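-- pv_equiv track=rewrite | github.com/gringo177/DI_Bootcamp | weekday4/challenge.py | decrypt_matrix
-- ===== SOURCE A (Python) =====
-- def decrypt_matrix(matrix):
--
--     rows = matrix.split('\n')
--
--
--     max_length = max(len(row) for row in rows)
--
--
--     columns = [[] for _ in range(max_length)]
--
--
--     for row in rows:
--         for col_index, char in enumerate(row):
--             if char.isalnum():
--                 columns[col_index].append(char)
--
--
--     secret_message = ""
--     for column in columns:
--         secret_message += "".join(column) + " "
--
--
--     decrypted_message = ""
--     last_alpha_index = 0
--     for i in range(len(secret_message)):
--         if not secret_message[i].isalnum():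
--             decrypted_message += secret_message[last_alpha_index:i] + " "
--             last_alpha_index = i + 1
--
--     return decrypted_message.strip()
-- ===== SOURCE B (Python) =====
-- def decrypt_matrix(matrix):
--     rows = matrix.split('\n')
--     width = max(len(r) for r in rows)
--     columns = (''.join(r[c] for r in rows if c < len(r) and r[c].isalnum())
--                for c in range(width))
--     return ' '.join(columns).strip()
-- ===== Notes on version B (the rewrite author's own statement) =====
-- stated objective: simpler
-- what changed: B traverses column-outer (one pass per column index over the rows) and returns ' '.join(columns).strip() directly, eliminating A's row-outer enumerate loop into mutable column buckets and A's entire secret_message reconstruction pass (which is the identity).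
import Mathlib
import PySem

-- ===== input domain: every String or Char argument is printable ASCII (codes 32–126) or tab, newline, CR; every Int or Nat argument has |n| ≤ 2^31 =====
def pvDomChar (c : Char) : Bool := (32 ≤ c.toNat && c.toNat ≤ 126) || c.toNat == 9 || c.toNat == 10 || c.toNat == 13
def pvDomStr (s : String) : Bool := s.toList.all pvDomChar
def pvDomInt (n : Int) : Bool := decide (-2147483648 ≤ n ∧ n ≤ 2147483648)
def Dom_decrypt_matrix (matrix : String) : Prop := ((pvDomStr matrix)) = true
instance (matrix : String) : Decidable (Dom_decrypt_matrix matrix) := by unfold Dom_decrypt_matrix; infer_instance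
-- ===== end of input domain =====

-- B replaces A's row-outer enumerate loop + secret_message reconstruction pass by a direct
-- column-outer build and ' '.join(columns).strip(); objective: simpler.

-- ===== PORT A =====
def decrypt_matrix (matrix : String) : String :=
  let rows := PySem.Chars.splitOn matrix.toList ['\n']
  -- max(len(row) for row in rows); rows is never empty (split returns ≥ 1 piece), so the [] arm is unreachable
  let max_length : Nat :=
    match rows.map List.length with
    | [] => 0
    | x :: xs => xs.foldl max x
  let columns :=
    rows.foldl (fun cols row =>
      (PySem.List.enumerate row 0).foldl (fun cols p =>
        -- columns[col_index].append(char); col_index from enumerate is ≥ 0, so .toNat is exact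
        if PySem.Chars.isalnum p.2 then cols.modify p.1.toNat (· ++ [p.2]) else cols) cols)
      (List.replicate max_length ([] : List Char))
  let secret_message :=
    columns.foldl (fun acc column => acc ++ column ++ [' ']) []
  let st :=
    (PySem.List.pyRange 0 (secret_message.length : Int) 1).foldl
      (fun (st : List Char × Int) i =>
        if !(PySem.Chars.isalnum (PySem.List.pyGetD secret_message i ' ')) then
          (st.1 ++ PySem.List.slice secret_message (some st.2) (some i) ++ [' '], i + 1)
        else st)
      ([], 0)
  String.ofList (PySem.Chars.strip st.1)

-- ===== PORT B =====
def decrypt_matrix_alt (matrix : String) : String :=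
  let rows := PySem.Chars.splitOn matrix.toList ['\n']
  -- max(len(r) for r in rows); rows is never empty, so the [] arm is unreachable
  let width : Nat :=
    match rows.map List.length with
    | [] => 0
    | x :: xs => xs.foldl max x
  let columns := (List.range width).map (fun c =>
    rows.filterMap (fun r =>
      match r[c]? with
      | some ch => if PySem.Chars.isalnum ch then some ch else none
      | none => none))
  String.ofList (PySem.Chars.strip (PySem.Chars.join [' '] columns))

-- ===== PRECONDITION & SPEC =====
def Spec_decrypt_matrix (matrix : String) (out : String) : Prop := out = decrypt_matrix_alt matrix
instance (matrix : String) (out : String) : Decidable (Spec_decrypt_matrix matrix out) := by unfold Spec_decrypt_matrix; infer_instance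

-- ===== CLAIM (what is proved, stated in full; the proofs are below) =====
def Claim_equal_decrypt_matrix : Prop := ∀ (matrix : String), Dom_decrypt_matrix matrix → Spec_decrypt_matrix matrix (decrypt_matrix matrix)

-- ===== LEMMAS AND PROOFS =====

def pvPick (r : List Char) (c : Nat) : List Char :=
  match r[c]? with
  | some ch => if PySem.Chars.isalnum ch then [ch] else []
  | none => []

def pvPickFrom (r : List Char) (k c : Nat) : List Char :=
  if k ≤ c then pvPick r (c - k) else []

def pvColF (rows : List (List Char)) (c : Nat) : List Char :=
  rows.flatMap (fun r => pvPick r c)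

def pvFlat (cols : List (List Char)) : List Char :=
  cols.flatMap (fun col => col ++ [' '])

def pvLoopStep (s : List Char) (st : List Char × Int) (i : Int) : List Char × Int :=
  if !(PySem.Chars.isalnum (PySem.List.pyGetD s i ' ')) then
    (st.1 ++ PySem.List.slice s (some st.2) (some i) ++ [' '], i + 1)
  else st

theorem pvPickFrom_lt (r : List Char) {k c : Nat} (h : c < k) : pvPickFrom r k c = [] := by
  simp [pvPickFrom, Nat.not_le.mpr h]

theorem pvPickFrom_self (ch : Char) (r : List Char) (k : Nat) :
    pvPickFrom (ch :: r) k k = if PySem.Chars.isalnum ch then [ch] else [] := by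
  simp [pvPickFrom, pvPick]

theorem pvPickFrom_cons_gt (ch : Char) (r : List Char) {k c : Nat} (h : k < c) :
    pvPickFrom (ch :: r) k c = pvPickFrom r (k + 1) c := by
  have h1 : k ≤ c := le_of_lt h
  have h2 : k + 1 ≤ c := h
  have h3 : c - k = (c - (k + 1)) + 1 := by omega
  simp [pvPickFrom, h1, h2, pvPick, h3]

theorem pv_inner (r : List Char) (k : Nat) (cols : List (List Char)) (c : Nat) :
    ((PySem.List.enumerate r (k : Int)).foldl
      (fun cols p => if PySem.Chars.isalnum p.2 then cols.modify p.1.toNat (· ++ [p.2]) else cols)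
      cols)[c]? = cols[c]?.map (· ++ pvPickFrom r k c) := by
  induction r generalizing k cols with
  | nil =>
    simp [PySem.List.enumerate_nil, pvPickFrom, pvPick]
  | cons ch r ih =>
    rw [PySem.List.enumerate_cons, List.foldl_cons]
    have hk1 : (k : Int) + 1 = ((k + 1 : Nat) : Int) := by push_cast; ring
    rw [hk1, ih]
    by_cases ha : PySem.Chars.isalnum ch
    · simp only [ha, if_true, Int.toNat_natCast, List.getElem?_modify]
      rcases Nat.lt_trichotomy c k with hc | hc | hc
      · rw [pvPickFrom_lt _ hc, pvPickFrom_lt _ (by omega)]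
        simp [Nat.ne_of_gt hc]
      · subst hc
        rw [pvPickFrom_self, pvPickFrom_lt _ (by omega)]
        simp [ha]
        cases cols[c]? <;> simp
      · rw [pvPickFrom_cons_gt _ _ hc]
        simp [Nat.ne_of_lt hc]
    · simp only [ha, if_false, Bool.false_eq_true]
      rcases Nat.lt_trichotomy c k with hc | hc | hc
      · rw [pvPickFrom_lt _ hc, pvPickFrom_lt _ (by omega)]
      · subst hc
        rw [pvPickFrom_self, pvPickFrom_lt _ (by omega)]
        simp [ha]
      · rw [pvPickFrom_cons_gt _ _ hc]

theorem pv_outer (rows : List (List Char)) (cols : List (List Char)) (c : Nat) :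
    (rows.foldl (fun cols row =>
      (PySem.List.enumerate row 0).foldl (fun cols p =>
        if PySem.Chars.isalnum p.2 then cols.modify p.1.toNat (· ++ [p.2]) else cols) cols)
      cols)[c]? = cols[c]?.map (· ++ pvColF rows c) := by
  induction rows generalizing cols with
  | nil => cases h : cols[c]? <;> simp [pvColF, h]
  | cons row rows ih =>
    rw [List.foldl_cons, ih]
    rw [show (0 : Int) = ((0 : Nat) : Int) from rfl, pv_inner]
    cases h : cols[c]? <;> simp [pvColF, pvPickFrom, List.append_assoc]

theorem pv_getD_append (pre t : List Char) (ch : Char) (d : Char) :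
    PySem.List.pyGetD (pre ++ ch :: t) ((pre.length : Int)) d = ch := by
  rw [PySem.List.pyGetD_natCast]
  simp

theorem pv_run_alnum (s pre col rest : List Char) (hs : s = pre ++ col ++ rest)
    (hal : ∀ ch ∈ col, PySem.Chars.isalnum ch = true) (st : List Char × Int) :
    (PySem.List.pyRange (pre.length : Int) ((pre.length : Int) + (col.length : Int)) 1).foldl
      (pvLoopStep s) st = st := by
  induction col generalizing pre st with
  | nil => simp [PySem.List.pyRange_one_eq_nil]
  | cons ch col ih =>
    rw [PySem.List.pyRange_one_cons (by push_cast [List.length_cons]; omega), List.foldl_cons]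
    have hch : PySem.Chars.isalnum ch = true := hal ch (by simp)
    have hget : PySem.List.pyGetD s ((pre.length : Int)) ' ' = ch := by
      rw [hs]; simp [pv_getD_append pre (col ++ rest) ch ' ']
    have hstep : pvLoopStep s st (pre.length : Int) = st := by
      simp [pvLoopStep, hget, hch]
    rw [hstep]
    have h1 : ((pre.length : Int) + 1) = (((pre ++ [ch]).length : Nat) : Int) := by
      push_cast [List.length_append, List.length_cons, List.length_nil]; ring
    have h2 : ((pre.length : Int) + ((ch :: col).length : Int))
        = (((pre ++ [ch]).length : Nat) : Int) + ((col.length : Nat) : Int) := by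
      push_cast [List.length_append, List.length_cons, List.length_nil]; ring
    rw [h1, h2]
    exact ih (pre ++ [ch]) (by simpa [List.append_assoc] using hs) (fun c hc => hal c (by simp [hc])) st

theorem pv_loop (s : List Char) (cols : List (List Char)) (pre dm : List Char)
    (hal : ∀ col ∈ cols, ∀ ch ∈ col, PySem.Chars.isalnum ch = true)
    (hs : s = pre ++ pvFlat cols) :
    (PySem.List.pyRange (pre.length : Int) (s.length : Int) 1).foldl (pvLoopStep s)
      (dm, (pre.length : Int)) = (dm ++ pvFlat cols, (s.length : Int)) := by
  induction cols generalizing pre dm with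
  | nil =>
    have : s.length = pre.length := by rw [hs]; simp [pvFlat]
    rw [this, PySem.List.pyRange_one_eq_nil (le_refl _)]
    simp [pvFlat]
  | cons col cols ih =>
    have hflat : pvFlat (col :: cols) = col ++ ([' '] ++ pvFlat cols) := by
      simp [pvFlat]
    have hs' : s = (pre ++ col) ++ ' ' :: pvFlat cols := by
      rw [hs, hflat]; simp [List.append_assoc]
    have hlen : s.length = pre.length + col.length + 1 + (pvFlat cols).length := by
      rw [hs']; simp; omega
    -- split the range at m := pre.length + col.length
    have hsplit : PySem.List.pyRange (pre.length : Int) (s.length : Int) 1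
        = PySem.List.pyRange (pre.length : Int) ((pre.length : Int) + (col.length : Int)) 1
          ++ PySem.List.pyRange ((pre.length : Int) + (col.length : Int)) (s.length : Int) 1 := by
      exact PySem.List.pyRange_one_append _ _ _ (by omega)
        (by omega)
    rw [hsplit, List.foldl_append,
      pv_run_alnum s pre col (' ' :: pvFlat cols) (by rw [hs, hflat]; simp [List.append_assoc]) (hal col (by simp))]
    have hm : ((pre.length : Int) + (col.length : Int)) < (s.length : Int) := by omega
    rw [PySem.List.pyRange_one_cons hm, List.foldl_cons]
    have hget : PySem.List.pyGetD s ((pre.length : Int) + (col.length : Int)) ' ' = ' ' := by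
      have := pv_getD_append (pre ++ col) (pvFlat cols) ' ' ' '
      rw [hs']
      simpa [List.length_append] using this
    have hslice : PySem.List.slice s (some (pre.length : Int))
        (some ((pre.length : Int) + (col.length : Int))) = col := by
      rw [PySem.List.slice_natCast_add, hs']
      simp
    have hstep : pvLoopStep s (dm, (pre.length : Int)) ((pre.length : Int) + (col.length : Int))
        = (dm ++ col ++ [' '], (pre.length : Int) + (col.length : Int) + 1) := by
      simp [pvLoopStep, hget, hslice]
      decide
    rw [hstep]
    have h1 : ((pre.length : Int) + (col.length : Int) + 1)
        = (((pre ++ col ++ [' ']).length : Nat) : Int) := by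
      push_cast [List.length_append, List.length_cons, List.length_nil]; ring
    rw [h1]
    have := ih (pre ++ col ++ [' ']) (dm ++ col ++ [' '])
      (fun c hc => hal c (by simp [hc]))
      (by rw [hs, hflat]; simp [List.append_assoc])
    rw [this]
    simp [pvFlat, List.append_assoc]

theorem pv_rstrip_space (x : List Char) :
    PySem.Chars.rstrip (x ++ [' ']) = PySem.Chars.rstrip x := by
  have h : PySem.Chars.isspace ' ' = true := by decide
  simp [PySem.Chars.rstrip, h]

theorem pv_strip_space (x : List Char) :
    PySem.Chars.strip (x ++ [' ']) = PySem.Chars.strip x := by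
  have h : PySem.Chars.isspace ' ' = true := by decide
  unfold PySem.Chars.strip PySem.Chars.lstrip
  rw [List.dropWhile_append]
  by_cases he : (List.dropWhile PySem.Chars.isspace x).isEmpty
  · rw [if_pos he]
    have hx : List.dropWhile PySem.Chars.isspace x = [] := by
      simpa [List.isEmpty_iff] using he
    simp [hx, h, PySem.Chars.rstrip]
  · rw [if_neg he, pv_rstrip_space]

theorem pv_flat_eq_join (L : List (List Char)) (h : L ≠ []) :
    pvFlat L = PySem.Chars.join [' '] L ++ [' '] := by
  induction L with
  | nil => simp at h
  | cons c t ih =>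
    cases t with
    | nil => simp [pvFlat, PySem.Chars.join_singleton]
    | cons d t' =>
      rw [PySem.Chars.join_cons_cons]
      have := ih (by simp)
      simp only [pvFlat, List.flatMap_cons] at this ⊢
      rw [this]
      simp [List.append_assoc]

theorem pv_filterMap (rows : List (List Char)) (c : Nat) :
    rows.filterMap (fun r =>
      match r[c]? with
      | some ch => if PySem.Chars.isalnum ch then some ch else none
      | none => none) = pvColF rows c := by
  induction rows with
  | nil => simp [pvColF]
  | cons r rows ih =>
    rw [List.filterMap_cons]
    cases h : r[c]? with
    | none => simp [pvColF, pvPick, h] at ih ⊢; exact ih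
    | some ch =>
      by_cases ha : PySem.Chars.isalnum ch <;>
        simp [pvColF, pvPick, h, ha] at ih ⊢ <;> exact ih

theorem pv_alnum_colF (rows : List (List Char)) (c : Nat) :
    ∀ ch ∈ pvColF rows c, PySem.Chars.isalnum ch = true := by
  intro ch hch
  simp only [pvColF, List.mem_flatMap] at hch
  obtain ⟨r, _, hr⟩ := hch
  unfold pvPick at hr
  cases h : r[c]? with
  | none => simp [h] at hr
  | some d =>
    rw [h] at hr
    by_cases ha : PySem.Chars.isalnum d
    · simp [ha] at hr; subst hr; exact ha
    · simp [ha] at hr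

theorem pv_main (rows : List (List Char)) (M : Nat) :
    (let columns :=
      rows.foldl (fun cols row =>
        (PySem.List.enumerate row 0).foldl (fun cols p =>
          if PySem.Chars.isalnum p.2 then cols.modify p.1.toNat (· ++ [p.2]) else cols) cols)
        (List.replicate M ([] : List Char));
     let secret_message :=
      columns.foldl (fun acc column => acc ++ column ++ [' ']) [];
     let st :=
      (PySem.List.pyRange 0 (secret_message.length : Int) 1).foldl
        (fun (st : List Char × Int) i =>
          if !(PySem.Chars.isalnum (PySem.List.pyGetD secret_message i ' ')) then
            (st.1 ++ PySem.List.slice secret_message (some st.2) (some i) ++ [' '], i + 1)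
          else st)
        ([], 0);
     PySem.Chars.strip st.1)
    = PySem.Chars.strip (PySem.Chars.join [' '] ((List.range M).map (fun c =>
        rows.filterMap (fun r =>
          match r[c]? with
          | some ch => if PySem.Chars.isalnum ch then some ch else none
          | none => none)))) := by
  have hBcols : (List.range M).map (fun c =>
      rows.filterMap (fun r =>
        match r[c]? with
        | some ch => if PySem.Chars.isalnum ch then some ch else none
        | none => none)) = (List.range M).map (pvColF rows) :=
    List.map_congr_left (fun c _ => pv_filterMap rows c)
  rw [hBcols]
  set L := (List.range M).map (pvColF rows) with hL
  -- A's columns equal L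
  have hcols : rows.foldl (fun cols row =>
      (PySem.List.enumerate row 0).foldl (fun cols p =>
        if PySem.Chars.isalnum p.2 then cols.modify p.1.toNat (· ++ [p.2]) else cols) cols)
      (List.replicate M ([] : List Char)) = L := by
    apply List.ext_getElem?
    intro c
    rw [pv_outer]
    by_cases hc : c < M <;> simp [hL, hc]
  simp only [hcols]
  -- secret message is pvFlat L
  have hsec : L.foldl (fun acc column => acc ++ column ++ [' ']) [] = pvFlat L := by
    have hfun : (fun (acc column : List Char) => acc ++ column ++ [' '])
        = (fun acc column => acc ++ (column ++ [' '])) := by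
      funext a b; simp [List.append_assoc]
    rw [hfun, PySem.List.foldl_append_eq_flatMap]
    simp [pvFlat]
  simp only [hsec]
  -- the reconstruction loop is the identity
  have hal : ∀ col ∈ L, ∀ ch ∈ col, PySem.Chars.isalnum ch = true := by
    intro col hcol
    simp only [hL, List.mem_map] at hcol
    obtain ⟨c, _, rfl⟩ := hcol
    exact pv_alnum_colF rows c
  have hloop := pv_loop (pvFlat L) L [] [] hal (by simp)
  simp only [List.length_nil, Nat.cast_zero, List.nil_append] at hloop
  have hfun2 : (fun (st : List Char × Int) (i : Int) =>
      if (!PySem.Chars.isalnum (PySem.List.pyGetD (pvFlat L) i ' ')) = true then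
        (st.1 ++ PySem.List.slice (pvFlat L) (some st.2) (some i) ++ [' '], i + 1)
      else st) = pvLoopStep (pvFlat L) := rfl
  rw [hfun2, hloop]
  -- strip absorbs the trailing space
  rcases eq_or_ne L [] with hLe | hLe
  · simp [hLe, pvFlat, PySem.Chars.join_nil]
  · rw [pv_flat_eq_join L hLe, pv_strip_space]

-- ===== VERDICT (by name: the statement is the Claim_ definition above) =====
theorem decrypt_matrix_spec : Claim_equal_decrypt_matrix := by
  intro matrix _
  unfold Spec_decrypt_matrix decrypt_matrix decrypt_matrix_alt
  exact congrArg String.ofList (pv_main _ _)
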